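-- pv_equiv track=rewrite | github.com/Shimaru1998/Practice | Double For loop/DoubleForLoop.py | which_band
-- ===== SOURCE A (Python) =====
-- bands = [
--     ["Takamatsu Tomori", "Chihaya Anon", "Kaname Rana", "Shiina Takki", "Nagasaki Soyo"], # Mygo
--     ["Misumi Uika", "Wakaba Mutsumi", "Youtenji, Nyamu", "Yahada Umiri", "Togawa Sakiko"]  # Ave Mujica
-- ]
--
-- def which_band(name) -> int:
--     for i in range(len(bands)):
--         for j in range(len(bands[i])):
--             if name == bands[i][j] and i == 0:
--                 return 0
--             elif name == bands[i][j] and i == 1: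
--                 return 1
--             else:
--                 continue
--     return -1
-- ===== SOURCE B (Python) =====
-- bands = [
--     ["Takamatsu Tomori", "Chihaya Anon", "Kaname Rana", "Shiina Takki", "Nagasaki Soyo"], # Mygo
--     ["Misumi Uika", "Wakaba Mutsumi", "Youtenji, Nyamu", "Yahada Umiri", "Togawa Sakiko"]  # Ave Mujica
-- ]
--
-- combined = bands[0] + bands[1]
--
-- def which_band(name) -> int:
--     return combined.index(name) // 5 if name in combined else -1
-- ===== Notes on version B (the rewrite author's own statement) =====
-- stated objective: idiomatic
-- what changed: Replaces the nested index loops over the two band lists with a single prebuilt flat list: membership test plus index//5 gives the band number directly.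
import Mathlib
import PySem

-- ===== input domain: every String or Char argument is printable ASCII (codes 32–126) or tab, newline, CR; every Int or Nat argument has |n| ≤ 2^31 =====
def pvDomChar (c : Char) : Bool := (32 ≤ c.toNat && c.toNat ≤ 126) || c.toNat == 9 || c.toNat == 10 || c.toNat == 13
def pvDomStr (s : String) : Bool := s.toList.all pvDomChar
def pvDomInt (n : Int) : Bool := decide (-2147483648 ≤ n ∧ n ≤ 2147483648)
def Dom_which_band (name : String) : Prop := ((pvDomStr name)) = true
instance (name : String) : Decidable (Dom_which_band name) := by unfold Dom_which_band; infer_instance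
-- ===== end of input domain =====

-- B replaces A's nested index loops with one prebuilt flat list and a single index//5 lookup (idiomatic; return value only).

-- ===== PORT A =====
def pvBands : List (List String) :=
  [["Takamatsu Tomori", "Chihaya Anon", "Kaname Rana", "Shiina Takki", "Nagasaki Soyo"],
   ["Misumi Uika", "Wakaba Mutsumi", "Youtenji, Nyamu", "Yahada Umiri", "Togawa Sakiko"]]

-- inner 'for j' loop of A: walks band i's members in order, same branch order as A
def pvInner (name : String) (i : Int) (row : List String) : Option Int :=
  match row with
  | [] => none
  | b :: rest =>
    if name == b && i == 0 then some 0
    else if name == b && i == 1 then some 1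
    else pvInner name i rest

-- outer 'for i' loop of A over the enumerated rows
def pvOuter (name : String) (rows : List (Int × List String)) : Int :=
  match rows with
  | [] => -1
  | (i, row) :: rest =>
    match pvInner name i row with
    | some r => r
    | none => pvOuter name rest

def which_band (name : String) : Int :=
  pvOuter name (PySem.List.enumerate pvBands)

-- ===== PORT B =====
def pvCombined : List String :=
  ["Takamatsu Tomori", "Chihaya Anon", "Kaname Rana", "Shiina Takki", "Nagasaki Soyo",
   "Misumi Uika", "Wakaba Mutsumi", "Youtenji, Nyamu", "Yahada Umiri", "Togawa Sakiko"]

def which_band_alt (name : String) : Int :=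
  match PySem.List.index? pvCombined name with
  | some k => PySem.Int.floordiv (k : Int) 5
  | none => -1

-- ===== PRECONDITION & SPEC =====
def Spec_which_band (name : String) (out : Int) : Prop := out = which_band_alt name
instance (name : String) (out : Int) : Decidable (Spec_which_band name out) := by unfold Spec_which_band; infer_instance

-- ===== CLAIM (what is proved, stated in full; the proofs are below) =====
def Claim_equal_which_band : Prop := ∀ (name : String), Dom_which_band name → Spec_which_band name (which_band name)

-- ===== LEMMAS AND PROOFS =====

-- ===== VERDICT (by name: the statement is the Claim_ definition above) =====
theorem which_band_spec : Claim_equal_which_band := by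
  intro name _
  unfold Spec_which_band which_band which_band_alt
  by_cases h1 : name = "Takamatsu Tomori"
  · subst h1; decide
  by_cases h2 : name = "Chihaya Anon"
  · subst h2; decide
  by_cases h3 : name = "Kaname Rana"
  · subst h3; decide
  by_cases h4 : name = "Shiina Takki"
  · subst h4; decide
  by_cases h5 : name = "Nagasaki Soyo"
  · subst h5; decide
  by_cases h6 : name = "Misumi Uika"
  · subst h6; decide
  by_cases h7 : name = "Wakaba Mutsumi"
  · subst h7; decide
  by_cases h8 : name = "Youtenji, Nyamu"
  · subst h8; decide
  by_cases h9 : name = "Yahada Umiri"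
  · subst h9; decide
  by_cases h10 : name = "Togawa Sakiko"
  · subst h10; decide
  · have hnone : PySem.List.index? pvCombined name = none := by
      rw [PySem.List.index?_eq_none_iff]
      simp [pvCombined, h1, h2, h3, h4, h5, h6, h7, h8, h9, h10]
    rw [PySem.List.index?_eq_idxOf?] at hnone
    simp [pvBands, PySem.List.enumerate, pvOuter, pvInner, hnone,
      h1, h2, h3, h4, h5, h6, h7, h8, h9, h10]
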